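-- pv_equiv track=rewrite | github.com/aks14075032/InterviewBit | Bit Manipulation/palindromic-binary-representation.py | solve
-- ===== SOURCE A (Python) =====
-- def convertToInt(binary):
--     ans = 0
--     for i in range(len(binary)):
--         ans = ans * 2 + (ord(binary[i]) - ord("0"))
--     return ans
--
-- def solve(A):
--     if A == 1:
--         return 1
--     A = A - 1
--     q = []
--     q.append("11")
--     while len(q) != 0:
--         curr = q.pop(0)
--         A -= 1
--
--         if A == 0:
--             return convertToInt(curr)
--
--         lenn = len(curr)
--         if lenn % 2 == 0:
--             q.append(curr[0 : int(lenn / 2)] + "0" + curr[int(lenn / 2) :])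
--             q.append(curr[0 : int(lenn / 2)] + "1" + curr[int(lenn / 2) :])
--         else:
--             midchar = curr[int(lenn / 2)]
--             q.append(curr[0 : int(lenn / 2)] + midchar + curr[int(lenn / 2) :])
--     return 0
-- ===== SOURCE B (Python) =====
-- def solve(A):
--     # Direct construction: find the length block by subtracting counts, then
--     # mirror the binary half arithmetically.  O(log A) instead of BFS over a queue.
--     if A == 1:
--         return 1
--     r = A - 2              # 0-based index among palindromes >= 3 (binary "11")
--     L = 2                  # bit length of the palindrome
--     while (1 << ((L - 1) // 2)) <= r:
--         r -= 1 << ((L - 1) // 2)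
--         L += 1
--     h = (L + 1) // 2       # length of the half (including middle bit if L odd)
--     half = (1 << (h - 1)) + r
--     res = half
--     t = half >> 1 if L % 2 == 1 else half
--     while t > 0:
--         res = res * 2 + (t & 1)
--         t >>= 1
--     return res
-- ===== Notes on version B (the rewrite author's own statement) =====
-- stated objective: faster
-- what changed: Replaced the BFS over a growing queue of palindrome strings (popping A-1 nodes) by direct arithmetic construction: subtract per-bit-length palindrome counts to locate the length block, then mirror the binary half with a bit loop.
-- outside the precondition, e.g. on solve(0): A does not finish within the time limit, B returns -1
import Mathlib
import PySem

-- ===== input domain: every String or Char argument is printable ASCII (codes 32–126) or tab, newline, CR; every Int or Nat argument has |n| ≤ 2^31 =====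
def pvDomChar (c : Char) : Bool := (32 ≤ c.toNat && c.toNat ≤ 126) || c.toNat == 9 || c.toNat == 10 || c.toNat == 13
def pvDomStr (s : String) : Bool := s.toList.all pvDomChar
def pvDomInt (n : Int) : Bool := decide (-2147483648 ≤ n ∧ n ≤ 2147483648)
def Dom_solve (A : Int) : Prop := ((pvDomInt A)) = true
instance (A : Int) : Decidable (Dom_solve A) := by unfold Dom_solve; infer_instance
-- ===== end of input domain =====

-- B replaces A's BFS over a queue of palindrome strings by O(log A) arithmetic
-- construction (count subtraction + mirroring the binary half); equivalence on A ≥ 1.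

-- ===== PORT A =====
-- Python strings are modeled as their character lists (PySem.Str itself is defined
-- over List Char); all slice bounds below are nonnegative and ≤ length, so the
-- slices are exactly take/drop.
def convertToInt (binary : List Char) : Int :=
  binary.foldl (fun ans c => ans * 2 + ((c.toNat : Int) - 48)) 0

-- the strings appended to the queue in one loop iteration, in order
def pvChildren (curr : List Char) : List (List Char) :=
  let lenn := curr.length
  if lenn % 2 = 0 then
    [curr.take (lenn / 2) ++ '0' :: curr.drop (lenn / 2),
     curr.take (lenn / 2) ++ '1' :: curr.drop (lenn / 2)]
  else
    -- curr[lenn // 2]: the index is always in range (curr is nonempty here)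
    let midchar := curr.getD (lenn / 2) '0'
    [curr.take (lenn / 2) ++ midchar :: curr.drop (lenn / 2)]

-- A's while loop.  The decremented counter (Python's re-bound A) is the recursion
-- measure: each iteration decrements it by exactly 1 and the loop returns when it
-- reaches 0.  With counter ≤ 0 Python never returns (excluded by Pre_solve);
-- the fallback value 0 in those clauses is never reached from `solve` under Pre_solve.
def solveLoop : Nat → List (List Char) → Int
  | _, [] => 0
  | n + 1, curr :: rest =>
      if n = 0 then convertToInt curr
      else solveLoop n (rest ++ pvChildren curr)
  | 0, _ :: _ => 0

def solve (A : Int) : Int :=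
  if A = 1 then 1 else solveLoop (A - 1).toNat [['1', '1']]

-- ===== PORT B =====
-- first while loop of Source B: subtract per-length palindrome counts;
-- `1 << ((L-1)//2)` is 2 ^ ((L-1)//2) (the shift count is ≥ 0 whenever reached)
def findLen (r : Int) (L : Int) : Int × Int :=
  let cnt : Int := 2 ^ (PySem.Int.floordiv (L - 1) 2).toNat
  if cnt ≤ r then findLen (r - cnt) (L + 1) else (r, L)
termination_by r.toNat
decreasing_by
  have h2 : (0:Int) < 2 ^ (PySem.Int.floordiv (L - 1) 2).toNat := by positivity
  simp only at *
  omega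

-- second while loop of Source B: `t & 1` = t % 2 and `t >> 1` = t // 2 for t > 0
def mirror (res : Int) (t : Int) : Int :=
  if 0 < t then mirror (res * 2 + PySem.Int.mod t 2) (PySem.Int.floordiv t 2) else res
termination_by t.toNat
decreasing_by
  have := PySem.Int.floordiv_eq_ediv_of_pos (a := t) (b := 2) (by omega)
  simp only at *
  omega

def solve_alt (A : Int) : Int :=
  if A = 1 then 1
  else
    let p := findLen (A - 2) 2
    let r := p.1
    let L := p.2
    let h := PySem.Int.floordiv (L + 1) 2
    let half : Int := 2 ^ (h - 1).toNat + r
    let t := if PySem.Int.mod L 2 = 1 then PySem.Int.floordiv half 2 else half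
    mirror half t

-- ===== PRECONDITION & SPEC =====
-- Pre_solve excludes A ≤ 0, on which Python A never returns: the queue never
-- empties and the counter is already < 0, so the `A == 0` exit is never taken.
def Pre_solve (A : Int) : Prop := 1 ≤ A
instance (A : Int) : Decidable (Pre_solve A) := by unfold Pre_solve; infer_instance
def pvWitness_solve : Int := 5

def Spec_solve (A : Int) (out : Int) : Prop := out = solve_alt A
instance (A : Int) (out : Int) : Decidable (Spec_solve A out) := by unfold Spec_solve; infer_instance

-- ===== CLAIM (what is proved, stated in full; the proofs are below) =====
def Claim_equal_solve : Prop := ∀ (A : Int), Dom_solve A → Pre_solve A → Spec_solve A (solve A)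

-- ===== LEMMAS AND PROOFS =====

-- binary digits of v, most significant first (empty for 0)
def bin : Nat → List Char
  | 0 => []
  | v + 1 => bin ((v + 1) / 2) ++ [if (v + 1) % 2 = 1 then '1' else '0']
decreasing_by omega

-- even-length palindrome with first half (of value) v, and odd-length one
def palE (v : Nat) : List Char := bin v ++ (bin v).reverse
def palO (v : Nat) : List Char := bin v ++ (bin v).dropLast.reverse
def palP (l v : Nat) : List Char := if l % 2 = 0 then palE v else palO v

-- number of palindromes of bit length l + 2, and the level list in BFS order
def cnt (l : Nat) : Nat := 2 ^ ((l + 1) / 2)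
def lvl (l : Nat) : List (List Char) := (List.range (cnt l)).map (fun i => palP l (cnt l + i))

theorem bin_eq (v : Nat) (hv : 1 ≤ v) :
    bin v = bin (v / 2) ++ [if v % 2 = 1 then '1' else '0'] := by
  cases v with
  | zero => omega
  | succ n => simp [bin]

theorem bin_len_pos (v : Nat) (hv : 1 ≤ v) : 1 ≤ (bin v).length := by
  rw [bin_eq v hv]; simp

theorem bin_double (v b : Nat) (hv : 1 ≤ v) (hb : b ≤ 1) :
    bin (2 * v + b) = bin v ++ [if b = 1 then '1' else '0'] := by
  rw [bin_eq (2 * v + b) (by omega)]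
  have h1 : (2 * v + b) / 2 = v := by omega
  have h2 : (2 * v + b) % 2 = b := by omega
  rw [h1, h2]

theorem children_palE (v : Nat) (hv : 1 ≤ v) :
    pvChildren (palE v) = [palO (2 * v), palO (2 * v + 1)] := by
  have hm := bin_len_pos v hv
  have hlen : (palE v).length = 2 * (bin v).length := by simp [palE]; omega
  have hhalf : (palE v).length / 2 = (bin v).length := by omega
  have htake : (palE v).take ((bin v).length) = bin v := by
    simp [palE]
  have hdrop : (palE v).drop ((bin v).length) = (bin v).reverse := by
    simp [palE]
  have hb0 : bin (2 * v) = bin v ++ ['0'] := by simpa using bin_double v 0 hv (by omega)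
  have hb1 : bin (2 * v + 1) = bin v ++ ['1'] := by simpa using bin_double v 1 hv (by omega)
  unfold pvChildren
  rw [hlen] at hhalf ⊢
  simp only [Nat.mul_mod_right, hhalf, htake, hdrop]
  simp [palO, hb0, hb1]

theorem children_palO (v : Nat) (hv : 1 ≤ v) :
    pvChildren (palO v) = [palE v] := by
  obtain ⟨xs, d, hxd⟩ : ∃ xs d, bin v = xs ++ [d] :=
    ⟨bin (v / 2), _, bin_eq v hv⟩
  have hlen : (palO v).length = 2 * xs.length + 1 := by simp [palO, hxd]; omega
  have hhalf : (palO v).length / 2 = xs.length := by omega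
  have hsh : palO v = xs ++ d :: (xs.reverse) := by simp [palO, hxd]
  have htake : (palO v).take xs.length = xs := by simp [hsh]
  have hdrop : (palO v).drop xs.length = d :: xs.reverse := by simp [hsh]
  have hget : (palO v).getD xs.length '0' = d := by
    rw [hsh]; simp [List.getD]
  unfold pvChildren
  have hodd : ¬ ((palO v).length % 2 = 0) := by omega
  simp only [hodd, hhalf, htake, hdrop, hget, ite_false]
  simp [palE, hxd]

theorem flatMap_single {α β : Type} (g : α → β) (l : List α) :
    l.flatMap (fun i => [g i]) = l.map g := by
  induction l with
  | nil => rfl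
  | cons a l ih => simp [List.flatMap_cons, ih]

theorem flatMap_double (g : Nat → List Char) (c : Nat) :
    (List.range c).flatMap (fun i => [g (2 * i), g (2 * i + 1)]) =
      (List.range (2 * c)).map g := by
  induction c with
  | zero => rfl
  | succ m ih =>
      rw [List.range_succ, List.flatMap_append, ih]
      have : 2 * (m + 1) = (2 * m + 1) + 1 := by omega
      rw [this, List.range_succ, List.range_succ]
      simp

theorem cnt_pos (l : Nat) : 1 ≤ cnt l := Nat.one_le_two_pow

theorem lvl_succ (l : Nat) : (lvl l).flatMap pvChildren = lvl (l + 1) := by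
  rcases Nat.even_or_odd l with he | ho
  · -- l even: every node has two children, halves double
    have hmod : l % 2 = 0 := Nat.even_iff.mp he
    have hmod1 : ¬ ((l + 1) % 2 = 0) := by intro h; revert h; have := Nat.even_iff.mp he; omega
    have hc : cnt (l + 1) = 2 * cnt l := by
      unfold cnt
      have : (l + 1 + 1) / 2 = (l + 1) / 2 + 1 := by omega
      rw [this, pow_succ]; ring
    unfold lvl palP
    rw [List.flatMap_map]
    simp only [hmod, hmod1, ite_true, ite_false]
    have hstep : (fun i => pvChildren (palE (cnt l + i))) =
        fun i => [palO (2 * (cnt l + i)), palO (2 * (cnt l + i) + 1)] := by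
      funext i; exact children_palE _ (by have := cnt_pos l; omega)
    rw [hstep, hc]
    have := flatMap_double (fun j => palO (2 * cnt l + j)) (cnt l)
    simp only [show ∀ i, 2 * (cnt l + i) = 2 * cnt l + 2 * i from fun i => by omega] at *
    rw [← this]
    congr 1
  · -- l odd: every node has one child with the same half
    have hmod : ¬ (l % 2 = 0) := by simp [Nat.odd_iff.mp ho]
    have hmod1 : (l + 1) % 2 = 0 := by have := Nat.odd_iff.mp ho; omega
    have hc : cnt (l + 1) = cnt l := by
      unfold cnt; congr 1; omega
    unfold lvl palP
    rw [List.flatMap_map]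
    simp only [hmod, hmod1, ite_true, ite_false]
    have hstep : (fun i => pvChildren (palO (cnt l + i))) =
        fun i => [palE (cnt l + i)] := by
      funext i; exact children_palO _ (by have := cnt_pos l; omega)
    rw [hstep, hc, flatMap_single]

theorem foldl_bin (v : Nat) (a : Int) :
    List.foldl (fun ans c => ans * 2 + ((c.toNat : Int) - 48)) a (bin v) =
      a * 2 ^ (bin v).length + v := by
  induction v using Nat.strong_induction_on generalizing a with
  | _ v ih =>
    rcases Nat.eq_zero_or_pos v with h0 | h1
    · subst h0; simp [bin]
    · rw [bin_eq v h1, List.foldl_append, ih (v / 2) (by omega)]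
      rcases Nat.mod_two_eq_zero_or_one v with hp | hp <;>
        · simp [hp, pow_succ]
          ring_nf
          omega

theorem mirror_eq (t : Nat) (res : Int) :
    mirror res (t : Int) =
      List.foldl (fun ans c => ans * 2 + ((c.toNat : Int) - 48)) res (bin t).reverse := by
  induction t using Nat.strong_induction_on generalizing res with
  | _ t ih =>
    rcases Nat.eq_zero_or_pos t with h0 | h1
    · subst h0; rw [mirror]; simp [bin]
    · rw [mirror, if_pos (by exact_mod_cast h1)]
      have hm : PySem.Int.mod (t : Int) 2 = ((t % 2 : Nat) : Int) := by
        exact_mod_cast PySem.Int.mod_natCast t 2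
      have hd : PySem.Int.floordiv (t : Int) 2 = ((t / 2 : Nat) : Int) := by
        exact_mod_cast PySem.Int.floordiv_natCast t 2
      rw [hm, hd]
      rw [ih (t / 2) (by omega)]
      rw [bin_eq t h1, List.reverse_append]
      rcases Nat.mod_two_eq_zero_or_one t with hp | hp <;> simp [hp]

theorem convert_palE (v : Nat) :
    convertToInt (palE v) = mirror (v : Int) (v : Int) := by
  unfold convertToInt palE
  rw [List.foldl_append, foldl_bin v 0, mirror_eq v]
  simp

theorem convert_palO (v : Nat) (hv : 1 ≤ v) :
    convertToInt (palO v) = mirror (v : Int) ((v / 2 : Nat) : Int) := by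
  unfold convertToInt palO
  have hdl : (bin v).dropLast = bin (v / 2) := by
    rw [bin_eq v hv]; simp
  rw [hdl, List.foldl_append, foldl_bin v 0, mirror_eq (v / 2)]
  simp

-- peeling a whole block q off the front of the queue
theorem loop_split (q : List (List Char)) :
    ∀ (acc : List (List Char)) (n : Nat), 1 ≤ n →
    solveLoop n (q ++ acc) =
      if n ≤ q.length then convertToInt (q.getD (n - 1) [])
      else solveLoop (n - q.length) (acc ++ q.flatMap pvChildren) := by
  induction q with
  | nil =>
      intro acc n hn
      rw [if_neg (by simp; omega)]
      simp
  | cons c q' ih =>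
      intro acc n hn
      match n, hn with
      | 1, _ =>
          rw [if_pos (by simp)]
          simp [solveLoop]
      | (m + 2), _ =>
          have hL : solveLoop (m + 2) ((c :: q') ++ acc) =
              solveLoop (m + 1) ((q' ++ acc) ++ pvChildren c) := by
            simp [solveLoop]
          rw [hL, List.append_assoc, ih (acc ++ pvChildren c) (m + 1) (by omega)]
          by_cases hle : m + 1 ≤ q'.length
          · rw [if_pos hle, if_pos (by simp; omega)]
            simp
          · rw [if_neg hle, if_neg (by simp; omega)]
            simp [List.append_assoc]

theorem lvl_length (l : Nat) : (lvl l).length = cnt l := by simp [lvl]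

theorem lvl_getD (l i : Nat) (hi : i < cnt l) :
    (lvl l).getD i [] = palP l (cnt l + i) := by
  unfold lvl
  rw [List.getD_eq_getElem?_getD, List.getElem?_map, List.getElem?_range hi]
  rfl

theorem loop_lvl (n l : Nat) (hn : 1 ≤ n) :
    solveLoop n (lvl l) =
      if n ≤ cnt l then convertToInt (palP l (cnt l + (n - 1)))
      else solveLoop (n - cnt l) (lvl (l + 1)) := by
  have := loop_split (lvl l) [] n hn
  simp only [List.append_nil, List.nil_append, lvl_succ, lvl_length] at this
  rw [this]
  by_cases hle : n ≤ cnt l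
  · rw [if_pos hle, if_pos hle, lvl_getD l (n - 1) (by omega)]
  · rw [if_neg hle, if_neg hle]

-- B's post-processing after its first loop (proof-side restatement of solve_alt's tail)
def pvPost (p : Int × Int) : Int :=
  let h := PySem.Int.floordiv (p.2 + 1) 2
  let half : Int := 2 ^ (h - 1).toNat + p.1
  let t := if PySem.Int.mod p.2 2 = 1 then PySem.Int.floordiv half 2 else half
  mirror half t

theorem main_lemma (n : Nat) : ∀ (l : Nat), 1 ≤ n →
    solveLoop n (lvl l) = pvPost (findLen ((n : Int) - 1) ((l : Int) + 2)) := by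
  induction n using Nat.strong_induction_on with
  | _ n ih =>
    intro l hn
    have hcpos : 1 ≤ cnt l := cnt_pos l
    have hcnt_exp : (PySem.Int.floordiv ((l : Int) + 2 - 1) 2).toNat = (l + 1) / 2 := by
      rw [PySem.Int.floordiv_eq_ediv_of_pos (by omega)]
      omega
    have hcnt_cast : ((2 : Int) ^ ((l + 1) / 2)) = ((cnt l : Nat) : Int) := by
      unfold cnt; push_cast; ring
    rw [loop_lvl n l hn, findLen]
    simp only [hcnt_exp, hcnt_cast]
    by_cases hle : n ≤ cnt l
    · -- terminal block: both sides name the same palindrome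
      rw [if_pos hle, if_neg (by omega)]
      unfold pvPost
      have hh : (PySem.Int.floordiv ((l : Int) + 2 + 1) 2 - 1).toNat = (l + 1) / 2 := by
        rw [PySem.Int.floordiv_eq_ediv_of_pos (by omega)]
        omega
      simp only [hh, hcnt_cast]
      have hhalf : ((cnt l : Nat) : Int) + ((n : Int) - 1) = ((cnt l + (n - 1) : Nat) : Int) := by
        push_cast; omega
      rw [hhalf]
      have hmod : PySem.Int.mod ((l : Int) + 2) 2 = PySem.Int.mod (l : Int) 2 := by
        rw [PySem.Int.mod_eq_emod_of_pos (by omega), PySem.Int.mod_eq_emod_of_pos (by omega)]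
        omega
      rw [hmod]
      unfold palP
      rcases Nat.mod_two_eq_zero_or_one l with hp | hp
      · have : ¬ (PySem.Int.mod (l : Int) 2 = 1) := by
          rw [PySem.Int.mod_eq_emod_of_pos (by omega)]; omega
        rw [if_pos (by omega), if_neg this, convert_palE]
      · have : PySem.Int.mod (l : Int) 2 = 1 := by
          rw [PySem.Int.mod_eq_emod_of_pos (by omega)]; omega
        have hfd : PySem.Int.floordiv ((cnt l + (n - 1) : Nat) : Int) 2 =
            (((cnt l + (n - 1)) / 2 : Nat) : Int) := by
          exact_mod_cast PySem.Int.floordiv_natCast (cnt l + (n - 1)) 2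
        rw [if_neg (by omega), if_pos this, hfd, convert_palO _ (by omega)]
    · -- recursive block: both sides step to the next length
      rw [if_neg hle, if_pos (by omega)]
      have h1 : 1 ≤ n - cnt l := by omega
      have e1 : (n : Int) - 1 - ((cnt l : Nat) : Int) = ((n - cnt l : Nat) : Int) - 1 := by
        omega
      have e2 : ((l : Int) + 2 + 1) = (((l + 1 : Nat)) : Int) + 2 := by push_cast; ring
      rw [e1, e2, ih (n - cnt l) (by omega) (l + 1) h1]

theorem bin_one : bin 1 = ['1'] := by
  rw [bin_eq 1 (by omega)]; simp [bin]

theorem lvl_zero : lvl 0 = [['1', '1']] := by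
  simp [lvl, cnt, palP, palE, bin_one]

-- ===== VERDICT (by name: the statement is the Claim_ definition above) =====
theorem solve_spec : Claim_equal_solve := by
  unfold Claim_equal_solve Spec_solve Pre_solve
  intro A _ hA
  by_cases h1 : A = 1
  · subst h1; simp [solve, solve_alt]
  · have h2 : 2 ≤ A := by omega
    unfold solve solve_alt
    rw [if_neg h1, if_neg h1]
    have hn1 : 1 ≤ (A - 1).toNat := by omega
    have hcast : (((A - 1).toNat : Nat) : Int) - 1 = A - 2 := by omega
    have hmain := main_lemma (A - 1).toNat 0 hn1
    rw [← lvl_zero, hmain, hcast]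
    simp only [Nat.cast_zero, zero_add]
    rfl
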